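-- pv_equiv track=rewrite | github.com/rhythmcao/text-to-sql-astormer | nsts/value_processor.py | extract_raw_question_span
-- ===== SOURCE A (Python) =====
-- def extract_raw_question_span(s: str, q: str):
--     """ During postprocessing, if the SQL value happen to appear in the raw question,
--     instead of the tokenized lowercased version which may be wrong due to tokenization error (e.g. `bob @ example . org` ).
--     Notice that q should be cased version, and if ignore whitespaces, s should occur in q.lower()
--     """
--     if s in q: return s
--     if s in q.lower(): # preserve upper/lower case
--         start_id = q.lower().index(s)
--         return q[start_id: start_id + len(s)]
--     s_, q_ = s.replace(' ', ''), q.replace(' ', '')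
--     index_mapping = [idx for idx, c in enumerate(q) if c != ' ']
--     try:
--         start_id = q_.lower().index(s_)
--         start, end = index_mapping[start_id], index_mapping[start_id + len(s_) - 1]
--         return q[start: end + 1]
--     except: return s
-- ===== SOURCE B (Python) =====
-- import re
--
--
-- def extract_raw_question_span(s: str, q: str):
--     if s in q: return s
--     ql = q.lower()
--     if s in ql:  # preserve upper/lower case
--         start_id = ql.index(s)
--         return q[start_id: start_id + len(s)]
--     # whitespace-insensitive search: regex of s's non-space chars joined by ' *',
--     # run over the lowercased question (s is matched as-is, like q_.lower().index(s_))
--     chars = [c for c in s if c != ' ']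
--     if not chars:
--         return s
--     m = re.search(' *'.join(re.escape(c) for c in chars), ql)
--     return q[m.start(): m.end()] if m else s
-- ===== Notes on version B (the rewrite author's own statement) =====
-- stated objective: idiomatic
-- what changed: The whitespace-insensitive fallback no longer strips spaces and remaps indices through an index_mapping list; B instead joins s's non-space characters with ' *' into a regex (re.escape'd) and lets re.search scan the lowercased question directly, returning the matched span of the cased question.
-- intended difference: On a non-empty all-space s that does not occur in q while q has a non-space character, A's index_mapping[-1] wraps around and it returns q from its first to its last non-space character (e.g. A(' ', 'ab') = 'ab'), whereas B returns the fallback s itself, the intended 'value not found' result. — e.g. on extract_raw_question_span(" ", "ab"): A returns "ab", B returns " "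
import Mathlib
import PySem

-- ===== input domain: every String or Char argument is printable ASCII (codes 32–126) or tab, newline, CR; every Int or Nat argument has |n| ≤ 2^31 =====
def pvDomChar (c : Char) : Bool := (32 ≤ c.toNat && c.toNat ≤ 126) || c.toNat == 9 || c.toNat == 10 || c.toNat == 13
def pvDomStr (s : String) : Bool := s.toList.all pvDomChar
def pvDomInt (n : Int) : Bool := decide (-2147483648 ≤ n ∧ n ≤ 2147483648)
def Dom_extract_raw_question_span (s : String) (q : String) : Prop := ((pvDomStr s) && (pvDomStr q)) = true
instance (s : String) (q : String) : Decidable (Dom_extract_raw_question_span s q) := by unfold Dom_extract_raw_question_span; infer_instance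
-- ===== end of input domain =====

-- B replaces A's strip-spaces/index/index_mapping remap by a direct scan of the cased question
-- (in Python: a regex of s's non-space chars joined by ' *'); return-value equivalence only.

-- ===== PORT A =====
def extract_raw_question_span (s : String) (q : String) : String :=
  if PySem.Str.isIn s q then s
  else if PySem.Str.isIn s (PySem.Str.lower q) then
    let start_id := PySem.Str.find (PySem.Str.lower q) s
    PySem.Str.slice q (some start_id) (some (start_id + PySem.Str.len s))
  else
    let s_ := PySem.Str.replace s " " ""
    let q_ := PySem.Str.replace q " " ""
    let index_mapping := ((PySem.List.enumerate q.toList 0).filter (fun p => p.2 != ' ')).map (·.1)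
    -- q_.lower().index(s_) raises ValueError exactly when find = -1 (then: except → return s)
    let start_id := PySem.Str.find (PySem.Str.lower q_) s_
    if start_id == -1 then s
    else
      -- list indexing raises IndexError exactly when pyGet? = none (then: except → return s)
      match PySem.List.pyGet? index_mapping start_id,
            PySem.List.pyGet? index_mapping (start_id + PySem.Str.len s_ - 1) with
      | some st, some en => PySem.Str.slice q (some st) (some (en + 1))
      | _, _ => s

-- ===== PORT B =====
-- Hand-port of re.search with the pattern c₀ ' *' c₁ ' *' … cₖ (each cᵢ a non-space literal):
-- exact because with a non-space literal after each greedy ' *', the engine is forced to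
-- consume exactly the maximal run of spaces, and re.search tries start positions left to right.
def pvMatchRest : List Char → List Char → Option Nat
  | _, [] => some 0
  | [], _ :: _ => none
  | d :: r, c :: cs' =>
      if d == ' ' then (pvMatchRest r (c :: cs')).map (· + 1)
      else if d == c then (pvMatchRest r cs').map (· + 1)
      else none

def pvMatchFirst : List Char → List Char → Option Nat
  | _, [] => some 0
  | [], _ :: _ => none
  | d :: r, c :: cs' => if d == c then (pvMatchRest r cs').map (· + 1) else none

def pvSearch (p : Nat) (l : List Char) (cs : List Char) : Option (Nat × Nat) :=
  match pvMatchFirst l cs with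
  | some m => some (p, p + m)
  | none =>
    match l with
    | [] => none
    | _ :: r => pvSearch (p + 1) r cs

def extract_raw_question_span_alt (s : String) (q : String) : String :=
  if PySem.Str.isIn s q then s
  else
    let ql := PySem.Str.lower q
    if PySem.Str.isIn s ql then
      let start_id := PySem.Str.find ql s
      PySem.Str.slice q (some start_id) (some (start_id + PySem.Str.len s))
    else
      let chars := s.toList.filter (· != ' ')
      if chars.isEmpty then s
      else
        match pvSearch 0 ql.toList chars with
        | some (a, b) => PySem.Str.slice q (some (a : Int)) (some (b : Int))
        | none => s

-- ===== PRECONDITION & SPEC =====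
-- On a non-empty all-space s that does not occur in q while q has a non-space character, A's
-- index_mapping[-1] wraps around and returns q from its first to its last non-space character,
-- whereas B returns the fallback s, the intended 'value not found' result.
def D_extract_raw_question_span (s : String) (q : String) : Prop :=
  s.toList ≠ [] ∧ (∀ c ∈ s.toList, c = ' ') ∧ PySem.Str.isIn s q = false ∧ ∃ c ∈ q.toList, c ≠ ' '
instance (s : String) (q : String) : Decidable (D_extract_raw_question_span s q) := by
  unfold D_extract_raw_question_span; infer_instance

def Spec_extract_raw_question_span (s : String) (q : String) (out : String) : Prop :=
  ¬ D_extract_raw_question_span s q → out = extract_raw_question_span_alt s q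
instance (s : String) (q : String) (out : String) : Decidable (Spec_extract_raw_question_span s q out) := by
  unfold Spec_extract_raw_question_span; infer_instance

def pvDiffWitness_extract_raw_question_span : String × String := (" ", "ab")
def pvDiffWitnessOut_extract_raw_question_span : String × String := ("ab", " ")

-- ===== CLAIM (what is proved, stated in full; the proofs are below) =====
def Claim_unchanged_extract_raw_question_span : Prop := ∀ (s : String) (q : String), Dom_extract_raw_question_span s q → Spec_extract_raw_question_span s q (extract_raw_question_span s q)
def Claim_changed_extract_raw_question_span : Prop := Dom_extract_raw_question_span (pvDiffWitness_extract_raw_question_span.1) (pvDiffWitness_extract_raw_question_span.2) ∧ D_extract_raw_question_span (pvDiffWitness_extract_raw_question_span.1) (pvDiffWitness_extract_raw_question_span.2) ∧ extract_raw_question_span (pvDiffWitness_extract_raw_question_span.1) (pvDiffWitness_extract_raw_question_span.2) = pvDiffWitnessOut_extract_raw_question_span.1 ∧ extract_raw_question_span_alt (pvDiffWitness_extract_raw_question_span.1) (pvDiffWitness_extract_raw_question_span.2) = pvDiffWitnessOut_extract_raw_question_span.2 ∧ pvDiffWitnessOut_extract_raw_question_span.1 ≠ pvDiffWitnessOut_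extract_raw_question_span.2
def Claim_exact_extract_raw_question_span : Prop := ∀ (s : String) (q : String), Dom_extract_raw_question_span s q → D_extract_raw_question_span s q → extract_raw_question_span s q ≠ extract_raw_question_span_alt s q

-- ===== LEMMAS AND PROOFS =====

def pvImap : List Char → List Nat
  | [] => []
  | c :: r => if c == ' ' then (pvImap r).map (· + 1) else 0 :: (pvImap r).map (· + 1)

theorem pvImap_length (u : List Char) : (pvImap u).length = (u.filter (· != ' ')).length := by
  induction u with
  | nil => rfl
  | cons c r ih =>
    by_cases h : c = ' ' <;> simp [pvImap, h, ih]

theorem pvLowerChar_space (c : Char) : (PySem.Chars.lowerChar c == ' ') = (c == ' ') := by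
  unfold PySem.Chars.lowerChar PySem.Chars.isupper
  split
  · rename_i h
    simp only [Bool.and_eq_true, decide_eq_true_eq] at h
    have h1 : 65 ≤ c.toNat := h.1
    have h2 : c.toNat ≤ 90 := h.2
    have hv : Nat.isValidChar (c.toNat + 32) := Or.inl (by omega)
    have ht : (Char.ofNat (c.toNat + 32)).toNat = c.toNat + 32 := by rw [Char.toNat_ofNat]; simp [hv]
    have : Char.ofNat (c.toNat + 32) ≠ ' ' := by
      intro he
      rw [he] at ht
      have h32 : (' ').toNat = 32 := by decide
      omega
    have : c ≠ ' ' := by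
      intro he
      rw [he] at h1
      have h32 : (' ').toNat = 32 := by decide
      omega
    simp_all
  · rfl

theorem pvImap_lower (u : List Char) : pvImap (PySem.Chars.lower u) = pvImap u := by
  induction u with
  | nil => rfl
  | cons c r ih =>
    simp only [PySem.Chars.lower, List.map_cons] at *
    simp only [pvImap, pvLowerChar_space, ih]

theorem pvFilter_lower (u : List Char) :
    (PySem.Chars.lower u).filter (· != ' ') = PySem.Chars.lower (u.filter (· != ' ')) := by
  induction u with
  | nil => rfl
  | cons c r ih =>
    simp only [PySem.Chars.lower, List.map_cons, List.filter_cons] at *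
    have : (PySem.Chars.lowerChar c != ' ') = (c != ' ') := by
      simp [bne, pvLowerChar_space]
    rw [this]
    by_cases h : (c != ' ') = true
    · simp [h, ih]
    · simp at h; simp [h, ih]

theorem pvReplaceGo_space (l : List Char) : ∀ (fuel : Nat) (acc : List Char), l.length ≤ fuel →
    PySem.Chars.replace.go [' '] [] fuel l acc = acc.reverse ++ l.filter (· != ' ') := by
  induction l with
  | nil =>
    intro fuel acc _
    cases fuel <;> simp [PySem.Chars.replace.go]
  | cons c t ih =>
    intro fuel acc hf
    cases fuel with
    | zero => simp at hf
    | succ f =>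
      rw [PySem.Chars.replace.go]
      by_cases h : c = ' '
      · have hp : List.isPrefixOf [' '] (c :: t) = true := by
          simp [List.isPrefixOf, h]
        simp only [hp, h]
        exact ih f acc (by simpa using hf)
      · have hp : List.isPrefixOf [' '] (c :: t) = false := by
          simp [List.isPrefixOf]; exact fun hh => h hh.symm
        simp only [hp]
        rw [if_neg (by simp)]
        rw [ih f _ (by simpa using hf)]
        simp [h]

theorem pvReplace_space (u : List Char) :
    PySem.Chars.replace u [' '] [] = u.filter (· != ' ') := by
  rw [PySem.Chars.replace]
  rw [if_neg (by simp)]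
  rw [pvReplaceGo_space u u.length [] le_rfl]
  simp


def pvFirstOcc (cs : List Char) : List Char → Option Nat
  | [] => if cs.isPrefixOf [] then some 0 else none
  | w@(_ :: w') => if cs.isPrefixOf w then some 0 else (pvFirstOcc cs w').map (· + 1)

theorem pvFirstOcc_prefix {cs w : List Char} {j : Nat} (h : pvFirstOcc cs w = some j) :
    cs <+: w.drop j := by
  induction w generalizing j with
  | nil =>
    rw [pvFirstOcc] at h
    split at h
    · rename_i hp
      simp at h
      simp [← h, List.isPrefixOf_iff_prefix.mp hp]
    · simp at h
  | cons d w' ih =>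
    rw [pvFirstOcc] at h
    split at h
    · rename_i hp
      simp at h
      simp [← h, List.isPrefixOf_iff_prefix.mp hp]
    · rcases Option.map_eq_some_iff.mp h with ⟨j', hj', rfl⟩
      simpa using ih hj'

theorem pvGetD_map_succ (l : List Nat) (n : Nat) (hn : n < l.length) :
    (l.map (· + 1)).getD n 0 = l.getD n 0 + 1 := by
  rw [List.getD_eq_getElem?_getD, List.getElem?_map, List.getD_eq_getElem?_getD,
      List.getElem?_eq_getElem hn]
  simp

theorem pvMatchRest_eq (u cs : List Char) (h : ∀ c ∈ cs, c ≠ ' ') :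
    pvMatchRest u cs =
      if cs.isPrefixOf (u.filter (· != ' ')) then
        some (if cs.isEmpty then 0 else (pvImap u).getD (cs.length - 1) 0 + 1)
      else none := by
  induction u generalizing cs with
  | nil =>
    match cs with
    | [] => rfl
    | c :: cs' => simp [pvMatchRest]
  | cons d r ih =>
    match cs with
    | [] => rfl
    | c :: cs' =>
      have hc : c ≠ ' ' := h c (by simp)
      have hcs' : ∀ x ∈ cs', x ≠ ' ' := fun x hx => h x (by simp [hx])
      by_cases hd : d = ' '
      · -- skip the space
        have hfil : ((d :: r).filter (· != ' ')) = r.filter (· != ' ') := by simp [hd]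
        have him : pvImap (d :: r) = (pvImap r).map (· + 1) := by simp [pvImap, hd]
        rw [hfil, him, pvMatchRest, if_pos (by simp [hd]), ih _ h]
        by_cases hp : (c :: cs').isPrefixOf (r.filter (· != ' ')) = true
        · rw [if_pos hp, if_pos hp]
          have hlt : (c :: cs').length - 1 < (pvImap r).length := by
            have := (List.isPrefixOf_iff_prefix.mp hp).length_le
            rw [pvImap_length]; simp at this ⊢; omega
          rw [pvGetD_map_succ _ _ hlt]
          simp
        · rw [if_neg hp, if_neg hp]; simp
      · -- non-space head
        have hfil : ((d :: r).filter (· != ' ')) = d :: r.filter (· != ' ') := by simp [hd]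
        have him : pvImap (d :: r) = 0 :: (pvImap r).map (· + 1) := by simp [pvImap, hd]
        rw [hfil, him, pvMatchRest, if_neg (by simp [hd])]
        by_cases hdc : d = c
        · rw [if_pos (by simp [hdc]), ih _ hcs']
          have hpre : ((c :: cs').isPrefixOf (d :: r.filter (· != ' ')))
              = (cs'.isPrefixOf (r.filter (· != ' '))) := by
            simp [List.isPrefixOf, hdc]
          rw [hpre]
          by_cases hp : cs'.isPrefixOf (r.filter (· != ' ')) = true
          · rw [if_pos hp, if_pos hp]
            match cs' with
            | [] => simp
            | c2 :: cs'' =>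
              have hlt : (c2 :: cs'').length - 1 < (pvImap r).length := by
                have := (List.isPrefixOf_iff_prefix.mp hp).length_le
                rw [pvImap_length]; simp at this ⊢; omega
              have hidx : (c :: c2 :: cs'').length - 1 = ((c2 :: cs'').length - 1) + 1 := by
                simp
              rw [hidx, List.getD_cons_succ, pvGetD_map_succ _ _ hlt]
              simp
          · rw [if_neg hp, if_neg hp]; simp
        · rw [if_neg (by simp [hdc])]
          have : ((c :: cs').isPrefixOf (d :: r.filter (· != ' '))) = false := by
            simp [List.isPrefixOf]; exact fun hh => absurd hh.symm hdc
          rw [this]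
          simp

theorem pvFirstOcc_lt {cs w : List Char} {j : Nat} (hne : cs ≠ []) (h : pvFirstOcc cs w = some j) :
    j + cs.length ≤ w.length := by
  have hp := pvFirstOcc_prefix h
  have h1 := hp.length_le
  have h2 : j ≤ w.length := by
    by_contra hgt
    rw [List.drop_eq_nil_of_le (by omega)] at hp
    exact hne (List.prefix_nil.mp hp)
  rw [List.length_drop] at h1
  omega

theorem pvSearch_eq (u cs : List Char) (p : Nat) (hne : cs ≠ []) (h : ∀ c ∈ cs, c ≠ ' ') :
    pvSearch p u cs =
      (pvFirstOcc cs (u.filter (· != ' '))).map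
        (fun j => (p + (pvImap u).getD j 0, p + (pvImap u).getD (j + cs.length - 1) 0 + 1)) := by
  induction u generalizing p with
  | nil =>
    match cs, hne with
    | c :: cs', _ => simp [pvSearch, pvMatchFirst, pvFirstOcc, List.isPrefixOf]
  | cons d r ih =>
    match cs, hne with
    | c :: cs', _ =>
    have hc : c ≠ ' ' := h c (by simp)
    have hcs' : ∀ x ∈ cs', x ≠ ' ' := fun x hx => h x (by simp [hx])
    by_cases hd : d = ' '
    · -- space head: pvMatchFirst fails, everything shifts by one
      have hfil : ((d :: r).filter (· != ' ')) = r.filter (· != ' ') := by simp [hd]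
      have him : pvImap (d :: r) = (pvImap r).map (· + 1) := by simp [pvImap, hd]
      have hmf : pvMatchFirst (d :: r) (c :: cs') = none := by
        rw [pvMatchFirst, if_neg (by simp; exact fun hh => hc (hd ▸ hh.symm))]
      rw [pvSearch, hmf, hfil, him, ih (p + 1)]
      cases hfo : pvFirstOcc (c :: cs') (r.filter (· != ' ')) with
      | none => rfl
      | some j =>
        have hlen := pvFirstOcc_lt (by simp) hfo
        have hj : j < (pvImap r).length := by rw [pvImap_length]; simp at hlen ⊢; omega
        have hj2 : j + (c :: cs').length - 1 < (pvImap r).length := by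
          rw [pvImap_length]; simp at hlen ⊢; omega
        simp only [Option.map_some]
        rw [pvGetD_map_succ _ _ hj, pvGetD_map_succ _ _ hj2]
        simp only [Option.some.injEq, Prod.mk.injEq]
        omega
    · -- non-space head
      have hfil : ((d :: r).filter (· != ' ')) = d :: r.filter (· != ' ') := by simp [hd]
      have him : pvImap (d :: r) = 0 :: (pvImap r).map (· + 1) := by simp [pvImap, hd]
      rw [pvSearch, pvMatchFirst, hfil, him]
      by_cases hdc : d = c
      · rw [if_pos (by simp [hdc]), pvMatchRest_eq _ _ hcs']
        by_cases hp : cs'.isPrefixOf (r.filter (· != ' ')) = true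
        · -- match at this very position: pvFirstOcc = some 0
          have hocc : pvFirstOcc (c :: cs') (d :: r.filter (· != ' ')) = some 0 := by
            rw [pvFirstOcc, if_pos (by simp [List.isPrefixOf, hdc, hp])]
          rw [if_pos hp, hocc]
          simp only [Option.map_some, List.getD_cons_zero, Nat.add_zero]
          match cs' with
          | [] => simp
          | c2 :: cs'' =>
            have hlt : (c2 :: cs'').length - 1 < (pvImap r).length := by
              have := (List.isPrefixOf_iff_prefix.mp hp).length_le
              rw [pvImap_length]; simp at this ⊢; omega
            have hidx : 0 + (c :: c2 :: cs'').length - 1 = ((c2 :: cs'').length - 1) + 1 := by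
              simp
            rw [hidx, List.getD_cons_succ, pvGetD_map_succ _ _ hlt]
            constructor
        · -- no match here: recurse, pvFirstOcc shifts
          have hocc : pvFirstOcc (c :: cs') (d :: r.filter (· != ' '))
              = (pvFirstOcc (c :: cs') (r.filter (· != ' '))).map (· + 1) := by
            rw [pvFirstOcc, if_neg (by simp [List.isPrefixOf, hdc, hp])]
          rw [if_neg hp, hocc, ih (p + 1)]
          cases hfo : pvFirstOcc (c :: cs') (r.filter (· != ' ')) with
          | none => rfl
          | some j =>
            have hlen := pvFirstOcc_lt (by simp) hfo
            have hj : j < (pvImap r).length := by rw [pvImap_length]; simp at hlen ⊢; omega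
            have hj2 : j + (c :: cs').length - 1 < (pvImap r).length := by
              rw [pvImap_length]; simp at hlen ⊢; omega
            simp only [Option.map_some]
            have hi1 : (0 :: (pvImap r).map (· + 1)).getD (j + 1) 0 = (pvImap r).getD j 0 + 1 := by
              rw [List.getD_cons_succ, pvGetD_map_succ _ _ hj]
            have hidx : j + 1 + (c :: cs').length - 1 = (j + (c :: cs').length - 1) + 1 := by
              simp; omega
            have hi2 : (0 :: (pvImap r).map (· + 1)).getD (j + 1 + (c :: cs').length - 1) 0
                = (pvImap r).getD (j + (c :: cs').length - 1) 0 + 1 := by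
              rw [hidx, List.getD_cons_succ, pvGetD_map_succ _ _ hj2]
            rw [hi1, hi2]
            refine congrArg some ?_
            rw [Prod.mk.injEq]
            constructor <;> omega
      · -- heads differ: no match here either
        have hocc : pvFirstOcc (c :: cs') (d :: r.filter (· != ' '))
            = (pvFirstOcc (c :: cs') (r.filter (· != ' '))).map (· + 1) := by
          rw [pvFirstOcc, if_neg (by simp [List.isPrefixOf]; exact fun hh => absurd hh.symm hdc)]
        rw [if_neg (by simp; exact fun hh => hdc hh), hocc, ih (p + 1)]
        cases hfo : pvFirstOcc (c :: cs') (r.filter (· != ' ')) with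
        | none => rfl
        | some j =>
          have hlen := pvFirstOcc_lt (by simp) hfo
          have hj : j < (pvImap r).length := by rw [pvImap_length]; simp at hlen ⊢; omega
          have hj2 : j + (c :: cs').length - 1 < (pvImap r).length := by
            rw [pvImap_length]; simp at hlen ⊢; omega
          simp only [Option.map_some]
          have hi1 : (0 :: (pvImap r).map (· + 1)).getD (j + 1) 0 = (pvImap r).getD j 0 + 1 := by
            rw [List.getD_cons_succ, pvGetD_map_succ _ _ hj]
          have hidx : j + 1 + (c :: cs').length - 1 = (j + (c :: cs').length - 1) + 1 := by
            simp; omega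
          have hi2 : (0 :: (pvImap r).map (· + 1)).getD (j + 1 + (c :: cs').length - 1) 0
              = (pvImap r).getD (j + (c :: cs').length - 1) 0 + 1 := by
            rw [hidx, List.getD_cons_succ, pvGetD_map_succ _ _ hj2]
          rw [hi1, hi2]
          simp only [Option.some.injEq, Prod.mk.injEq]
          omega

theorem pvFirstOcc_min {cs w : List Char} {j : Nat} (h : pvFirstOcc cs w = some j) :
    ∀ i < j, ¬ cs <+: w.drop i := by
  induction w generalizing j with
  | nil =>
    rw [pvFirstOcc] at h
    split at h <;> simp at h
    omega
  | cons d w' ih =>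
    rw [pvFirstOcc] at h
    split at h
    · simp at h; omega
    · rcases Option.map_eq_some_iff.mp h with ⟨j', hj', rfl⟩
      intro i hi
      match i with
      | 0 => rename_i hnp; simpa [List.isPrefixOf_iff_prefix] using hnp
      | i + 1 => simpa using ih hj' i (by omega)

theorem pvFirstOcc_none {cs w : List Char} (h : pvFirstOcc cs w = none) :
    ∀ j, ¬ cs <+: w.drop j := by
  induction w with
  | nil =>
    rw [pvFirstOcc] at h
    split at h
    · simp at h
    · rename_i hnp
      intro j
      simpa [List.isPrefixOf_iff_prefix, List.drop_nil] using hnp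
  | cons d w' ih =>
    rw [pvFirstOcc] at h
    split at h
    · simp at h
    · rename_i hnp
      have h' : pvFirstOcc cs w' = none := by
        cases hfo : pvFirstOcc cs w' <;> simp [hfo] at h ⊢
      intro j
      match j with
      | 0 => simpa [List.isPrefixOf_iff_prefix] using hnp
      | j + 1 => simpa using ih h' j

theorem pvFirstOcc_eq_find (w cs : List Char) :
    pvFirstOcc cs w =
      if PySem.Chars.find w cs = -1 then none else some (PySem.Chars.find w cs).toNat := by
  cases hfo : pvFirstOcc cs w with
  | none =>
    rw [if_pos]
    rw [PySem.Chars.find_eq_neg_one_iff]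
    intro hinf
    have hex : ∃ j, cs <+: w.drop j := by
      rw [PySem.Chars.exists_prefix_drop_iff_isIn, PySem.Chars.isIn_iff_infix]
      exact hinf
    rcases hex with ⟨j, hj⟩
    exact pvFirstOcc_none hfo j hj
  | some j =>
    have hpre := pvFirstOcc_prefix hfo
    have hmin := pvFirstOcc_min hfo
    have hinf : cs <:+: w := by
      rw [← PySem.Chars.isIn_iff_infix, ← PySem.Chars.exists_prefix_drop_iff_isIn]
      exact ⟨j, hpre⟩
    have hne1 : PySem.Chars.find w cs ≠ -1 := (PySem.Chars.find_ne_neg_one_iff w cs).mpr hinf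
    have hnn : 0 ≤ PySem.Chars.find w cs := (PySem.Chars.find_nonneg_iff w cs).mpr hinf
    have hspec := PySem.Chars.find_spec hnn
    rw [if_neg hne1]
    congr 1
    rcases lt_trichotomy j (PySem.Chars.find w cs).toNat with hlt | heq | hgt
    · exact absurd hpre (hspec.2 j hlt)
    · exact heq
    · exact absurd hspec.1 (hmin _ hgt)

theorem pvIndexMapping_aux (t : List Char) (k : Int) :
    ((PySem.List.enumerate t k).filter (fun p => p.2 != ' ')).map (·.1)
      = (pvImap t).map (fun n : Nat => k + (n : Int)) := by
  induction t generalizing k with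
  | nil => rfl
  | cons c r ih =>
    rw [PySem.List.enumerate_cons]
    by_cases h : c = ' '
    · rw [List.filter_cons_of_neg (by simp [h])]
      rw [ih (k + 1)]
      have him : pvImap (c :: r) = (pvImap r).map (· + 1) := by simp [pvImap, h]
      rw [him, List.map_map]
      apply List.map_congr_left
      intro a _
      simp only [Function.comp_apply]
      push_cast
      ring
    · rw [List.filter_cons_of_pos (by simp [h])]
      rw [List.map_cons, ih (k + 1)]
      have him : pvImap (c :: r) = 0 :: (pvImap r).map (· + 1) := by simp [pvImap, h]
      rw [him, List.map_cons, List.map_map]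
      congr 1
      · simp
      · apply List.map_congr_left
        intro a _
        simp only [Function.comp_apply]
        push_cast
        ring

theorem pvIndexMapping_eq (t : List Char) :
    ((PySem.List.enumerate t 0).filter (fun p => p.2 != ' ')).map (·.1)
      = (pvImap t).map (fun n : Nat => (n : Int)) := by
  rw [pvIndexMapping_aux]
  simp

theorem pvBranch3_main (s q : String) (hnd : ¬ D_extract_raw_question_span s q)
    (h1 : PySem.Str.isIn s q = false)
    (h2 : PySem.Str.isIn s (PySem.Str.lower q) = false) :
    extract_raw_question_span s q = extract_raw_question_span_alt s q := by
  have hs_ : (PySem.Str.replace s " " "").toList = s.toList.filter (· != ' ') := by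
    have h32 : (" " : String).toList = [' '] := by decide
    have h0 : ("" : String).toList = [] := by decide
    simp only [PySem.Str.replace, h32, h0, String.toList_ofList]
    exact pvReplace_space _
  have hq_ : (PySem.Str.replace q " " "").toList = q.toList.filter (· != ' ') := by
    have h32 : (" " : String).toList = [' '] := by decide
    have h0 : ("" : String).toList = [] := by decide
    simp only [PySem.Str.replace, h32, h0, String.toList_ofList]
    exact pvReplace_space _
  set t := q.toList with ht
  set cs := s.toList.filter (· != ' ') with hcs_def
  -- the common haystack both variants search: the lowered, space-stripped question
  set w := PySem.Chars.lower (t.filter (· != ' ')) with hw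
  have hfindA : PySem.Str.find (PySem.Str.lower (PySem.Str.replace q " " ""))
      (PySem.Str.replace s " " "") = PySem.Chars.find w cs := by
    simp only [PySem.Str.find, PySem.Str.toList_lower, hs_, hq_, hw]
  have hlenw : w.length = (pvImap t).length := by
    rw [hw, PySem.Chars.lower, List.length_map, pvImap_length]
  have himap : ((PySem.List.enumerate q.toList 0).filter (fun p => p.2 != ' ')).map (·.1)
      = (pvImap t).map (fun n : Nat => (n : Int)) := pvIndexMapping_eq t
  have hlens_ : PySem.Str.len (PySem.Str.replace s " " "") = (cs.length : Int) := by
    simp only [PySem.Str.len, hs_]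
  by_cases hcs0 : cs = []
  · -- s is all spaces: B returns s; A hits an empty index_mapping (q is all spaces by ¬D_)
    have hsne : s.toList ≠ [] := by
      intro h0
      rw [PySem.Str.isIn, h0, PySem.Chars.isIn_nil] at h1
      exact absurd h1 (by simp)
    have hall : ∀ c ∈ s.toList, c = ' ' := by
      intro c hc
      have := List.filter_eq_nil_iff.mp (hcs_def ▸ hcs0) c hc
      simpa using this
    have hqall : t.filter (· != ' ') = [] := by
      by_contra hne
      rcases List.exists_mem_of_ne_nil _ hne with ⟨c, hc⟩
      have hc2 := List.mem_filter.mp hc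
      exact hnd ⟨hsne, hall, h1, c, hc2.1, by simpa using hc2.2⟩
    have himap0 : pvImap t = [] := by
      have := pvImap_length t
      rw [hqall] at this
      exact List.eq_nil_of_length_eq_zero this
    have hfind0 : PySem.Chars.find w cs = 0 := by
      rw [hcs0, PySem.Chars.find_nil]
    have hBempty : cs.isEmpty = true := by rw [hcs0]; rfl
    simp only [extract_raw_question_span, extract_raw_question_span_alt, h1, h2,
      Bool.false_eq_true, if_false]
    rw [← hcs_def]
    rw [hfindA, hfind0, himap, himap0, hBempty, if_pos rfl]
    simp [PySem.List.pyGet?]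
  · -- s has a non-space character: both variants locate the first whitespace-insensitive match
    have hnospace : ∀ c ∈ cs, c ≠ ' ' := by
      intro c hc
      simpa using (List.mem_filter.mp hc).2
    have hsearch : pvSearch 0 (PySem.Str.lower q).toList cs =
        (pvFirstOcc cs w).map
          (fun j => ((pvImap t).getD j 0, (pvImap t).getD (j + cs.length - 1) 0 + 1)) := by
      rw [PySem.Str.toList_lower, pvSearch_eq _ _ _ hcs0 hnospace, pvFilter_lower, pvImap_lower]
      rw [← ht]
      simp only [Nat.zero_add]
      rfl
    have hBne : cs.isEmpty = false := by simpa [List.isEmpty_iff] using hcs0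
    simp only [extract_raw_question_span, extract_raw_question_span_alt, h1, h2,
      Bool.false_eq_true, if_false]
    rw [← hcs_def]
    rw [hfindA, himap, hlens_, hsearch, hBne, pvFirstOcc_eq_find w cs]
    by_cases hF : PySem.Chars.find w cs = -1
    · simp [hF]
    · have hnn : 0 ≤ PySem.Chars.find w cs := by
        have := PySem.Chars.neg_one_le_find w cs
        omega
      set j : Nat := (PySem.Chars.find w cs).toNat with hj
      have hFj : PySem.Chars.find w cs = (j : Int) := (Int.toNat_of_nonneg hnn).symm
      have hpre : cs <+: w.drop j := (PySem.Chars.find_spec hnn).1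
      have hcslen : 1 ≤ cs.length := by
        rcases hc : cs with _ | _
        · exact absurd hc hcs0
        · simp
      have hrange : j + cs.length ≤ (pvImap t).length := by
        have h5 := hpre.length_le
        have h6 : (PySem.Chars.find w cs) ≤ (w.length : Int) := PySem.Chars.find_le_length w cs
        rw [List.length_drop] at h5
        rw [← hlenw]
        omega
      have hj1 : j < (pvImap t).length := by omega
      have hj2 : j + cs.length - 1 < (pvImap t).length := by omega
      have hg1 : PySem.List.pyGet? ((pvImap t).map (fun n : Nat => (n : Int)))
          (PySem.Chars.find w cs) = some (((pvImap t)[j] : Nat) : Int) := by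
        rw [hFj, PySem.List.pyGet?_natCast, List.getElem?_map,
            List.getElem?_eq_getElem hj1]
        rfl
      have hidx2 : PySem.Chars.find w cs + (cs.length : Int) - 1
          = ((j + cs.length - 1 : Nat) : Int) := by
        rw [hFj]; push_cast; omega
      have hg2 : PySem.List.pyGet? ((pvImap t).map (fun n : Nat => (n : Int)))
          (PySem.Chars.find w cs + (cs.length : Int) - 1)
          = some (((pvImap t)[j + cs.length - 1] : Nat) : Int) := by
        rw [hidx2, PySem.List.pyGet?_natCast, List.getElem?_map,
            List.getElem?_eq_getElem hj2]
        rfl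
      rw [if_neg (by simp [hF]), hg1, hg2, if_neg hF]
      simp only [Option.map_some]
      rw [List.getD_eq_getElem _ _ hj1, List.getD_eq_getElem _ _ hj2]
      push_cast
      rfl

-- ===== VERDICT (by name: the statement is the Claim_ definition above) =====
theorem extract_raw_question_span_spec : Claim_unchanged_extract_raw_question_span := by
  intro s q _ hnd
  cases h1 : PySem.Str.isIn s q with
  | true =>
    simp only [extract_raw_question_span, extract_raw_question_span_alt, h1, if_true]
  | false =>
    cases h2 : PySem.Str.isIn s (PySem.Str.lower q) with
    | true =>
      simp only [extract_raw_question_span, extract_raw_question_span_alt, h1, h2,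
        Bool.false_eq_true, if_false, if_true]
    | false => exact pvBranch3_main s q hnd h1 h2

theorem pvChgDom : Dom_extract_raw_question_span " " "ab" := by
  simp [Dom_extract_raw_question_span, pvDomStr, pvDomChar]

theorem pvChgD : D_extract_raw_question_span " " "ab" := by
  refine ⟨by simp, by simp, ?_, ?_⟩
  · simp [PySem.Str.isIn]
    decide
  · exact ⟨'a', by simp, by decide⟩

set_option maxRecDepth 4000 in
theorem pvChgA : extract_raw_question_span " " "ab" = "ab" := by
  simp only [extract_raw_question_span]
  decide

set_option maxRecDepth 4000 in
theorem pvChgB : extract_raw_question_span_alt " " "ab" = " " := by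
  simp only [extract_raw_question_span_alt]
  decide

theorem pvChgNe : ("ab" : String) ≠ " " := by decide

theorem extract_raw_question_span_changed : Claim_changed_extract_raw_question_span := by
  unfold Claim_changed_extract_raw_question_span
  exact ⟨pvChgDom, pvChgD, pvChgA, pvChgB, pvChgNe⟩


theorem pvImap_mem (u : List Char) : ∀ x ∈ pvImap u, ∃ (h : x < u.length), u[x] ≠ ' ' := by
  induction u with
  | nil => simp [pvImap]
  | cons c r ih =>
    intro x hx
    by_cases hc : c = ' '
    · rw [pvImap, if_pos (by simp [hc])] at hx
      rcases List.mem_map.mp hx with ⟨y, hy, rfl⟩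
      rcases ih y hy with ⟨h1, h2⟩
      exact ⟨by simpa using h1, by simpa using h2⟩
    · rw [pvImap, if_neg (by simp [hc])] at hx
      rcases List.mem_cons.mp hx with rfl | hx'
      · exact ⟨by simp, by simpa using hc⟩
      · rcases List.mem_map.mp hx' with ⟨y, hy, rfl⟩
        rcases ih y hy with ⟨h1, h2⟩
        exact ⟨by simpa using h1, by simpa using h2⟩

theorem pvImap_sorted (u : List Char) : (pvImap u).Pairwise (· < ·) := by
  induction u with
  | nil => simp [pvImap]
  | cons c r ih =>
    have hm : ((pvImap r).map (· + 1)).Pairwise (· < ·) := by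
      rw [List.pairwise_map]
      exact ih.imp (by omega)
    by_cases hc : c = ' '
    · rw [pvImap, if_pos (by simp [hc])]
      exact hm
    · rw [pvImap, if_neg (by simp [hc])]
      refine List.Pairwise.cons ?_ hm
      intro y hy
      rcases List.mem_map.mp hy with ⟨z, _, rfl⟩
      omega

theorem pvHead_le_getLast {l : List Nat} (hp : l.Pairwise (· < ·)) (h : l ≠ [])
    (h0 : 0 < l.length) : l[0] ≤ l.getLast h := by
  have hmem := List.getLast_mem h
  rcases l with _ | ⟨x, rest⟩
  · simp at h0
  · rcases List.mem_cons.mp hmem with heq | hmem'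
    · simp [heq]
    · have := (List.pairwise_cons.mp hp).1 _ hmem'
      simpa using le_of_lt this

theorem pvAllSpace_infix_lower {sub t : List Char} (hall : ∀ c ∈ sub, c = ' ')
    (h : sub <:+: PySem.Chars.lower t) : sub <:+: t := by
  rcases h with ⟨pre, suf, heq⟩
  rw [PySem.Chars.lower] at heq
  rcases List.map_eq_append_iff.mp heq.symm with ⟨l12, l3, rfl, hm12, _⟩
  rcases List.map_eq_append_iff.mp hm12 with ⟨l1, m, rfl, _, hmid⟩
  have hlen : m.length = sub.length := by
    have := congrArg List.length hmid
    simpa using this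
  have hmall : ∀ c ∈ m, c = ' ' := by
    intro c hc
    have hlc : PySem.Chars.lowerChar c ∈ sub := hmid ▸ List.mem_map_of_mem hc
    have hsp : PySem.Chars.lowerChar c = ' ' := hall _ hlc
    have hb : (c == ' ') = true := by
      rw [← pvLowerChar_space c, beq_iff_eq]
      exact hsp
    exact eq_of_beq hb
  have hrep : m = sub := by
    have hm1 : m = List.replicate sub.length ' ' := List.eq_replicate_iff.mpr ⟨hlen, hmall⟩
    have hm2 : sub = List.replicate sub.length ' ' := List.eq_replicate_iff.mpr ⟨rfl, hall⟩
    rw [hm1, ← hm2]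
  exact ⟨l1, l3, by rw [hrep, List.append_assoc]⟩

theorem extract_raw_question_span_tight : Claim_exact_extract_raw_question_span := by
  intro s q _ hD
  rcases hD with ⟨hs1, hall, h3, c, hcq, hcne⟩
  set t := q.toList with ht
  -- B's second branch cannot fire: an all-space s occurs in lower q only if it occurs in q
  have h2' : PySem.Str.isIn s (PySem.Str.lower q) = false := by
    by_contra hb
    have htrue : PySem.Str.isIn s (PySem.Str.lower q) = true := by
      cases hx : PySem.Str.isIn s (PySem.Str.lower q)
      · exact absurd hx hb
      · rfl
    have h4 : PySem.Chars.isIn s.toList ((PySem.Str.lower q).toList) = true := htrue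
    rw [PySem.Str.toList_lower] at h4
    have hinf := (PySem.Chars.isIn_iff_infix _ _).mp h4
    have h5 := pvAllSpace_infix_lower hall hinf
    have hQ : PySem.Str.isIn s q = true := (PySem.Chars.isIn_iff_infix _ _).mpr h5
    rw [h3] at hQ
    exact absurd hQ (by simp)
  have hcs0 : s.toList.filter (· != ' ') = [] := by
    rw [List.filter_eq_nil_iff]
    intro a ha
    simp [hall a ha]
  have hfq : t.filter (· != ' ') ≠ [] := by
    intro h0
    have : c ∈ t.filter (· != ' ') := List.mem_filter.mpr ⟨hcq, by simpa using hcne⟩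
    rw [h0] at this
    simp at this
  have himne : pvImap t ≠ [] := by
    intro h0
    have := pvImap_length t
    rw [h0] at this
    exact hfq (List.eq_nil_of_length_eq_zero this.symm)
  -- B returns s
  have hB : extract_raw_question_span_alt s q = s := by
    simp only [extract_raw_question_span_alt, h3, h2', Bool.false_eq_true, if_false]
    rw [hcs0]
    rfl
  -- A returns the span from the first to the last non-space character of q
  have hs_ : (PySem.Str.replace s " " "").toList = [] := by
    have h32 : (" " : String).toList = [' '] := by decide
    have h0 : ("" : String).toList = [] := by decide
    simp only [PySem.Str.replace, h32, h0, String.toList_ofList]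
    rw [pvReplace_space]
    exact hcs0
  have hfind0 : PySem.Str.find (PySem.Str.lower (PySem.Str.replace q " " ""))
      (PySem.Str.replace s " " "") = 0 := by
    rw [PySem.Str.find]
    rw [hs_]
    exact PySem.Chars.find_nil _
  have hlens0 : PySem.Str.len (PySem.Str.replace s " " "") = 0 := by
    simp only [PySem.Str.len, hs_]
    rfl
  have ha0 : 0 < (pvImap t).length := by
    rcases hx : pvImap t with _ | _
    · exact absurd hx himne
    · simp
  set a : Nat := (pvImap t)[0] with ha_def
  set b : Nat := (pvImap t).getLast himne with hb_def
  have hg1 : PySem.List.pyGet? ((pvImap t).map (fun n : Nat => (n : Int))) 0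
      = some ((a : Nat) : Int) := by
    rw [show (0 : Int) = ((0 : Nat) : Int) from rfl, PySem.List.pyGet?_natCast,
        List.getElem?_map, List.getElem?_eq_getElem ha0]
    rfl
  have hg2 : PySem.List.pyGet? ((pvImap t).map (fun n : Nat => (n : Int))) (0 + 0 - 1)
      = some ((b : Nat) : Int) := by
    rw [show (0 + 0 - 1 : Int) = -1 from rfl, PySem.List.pyGet?_neg_one, List.getLast?_map]
    rw [List.getLast?_eq_some_getLast himne]
    rfl
  have hA : extract_raw_question_span s q
      = PySem.Str.slice q (some ((a : Nat) : Int)) (some (((b : Nat) : Int) + 1)) := by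
    simp only [extract_raw_question_span, h3, h2', Bool.false_eq_true, if_false]
    rw [hfind0, pvIndexMapping_eq t, hlens0]
    rw [if_neg (by decide)]
    rw [hg1, hg2]
  -- the two values differ: A's answer starts with a non-space character, s with a space
  rw [hA, hB]
  intro heq
  have htl := congrArg String.toList heq
  rcases pvImap_mem t a (ha_def ▸ List.getElem_mem ha0) with ⟨halt, hans⟩
  have hab : a ≤ b := pvHead_le_getLast (pvImap_sorted t) himne ha0
  have hslice : (PySem.Str.slice q (some ((a : Nat) : Int)) (some (((b : Nat) : Int) + 1))).toList
      = (t.drop a).take (b + 1 - a) := by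
    simp only [PySem.Str.slice, String.toList_ofList, PySem.Chars.slice_eq_listSlice]
    rw [show (((b : Nat) : Int) + 1) = (((b + 1 : Nat)) : Int) from by push_cast; ring]
    rw [PySem.List.slice_natCast]
  rw [hslice] at htl
  have hdrop : t.drop a = t[a] :: t.drop (a + 1) := List.drop_eq_getElem_cons halt
  rcases hs : s.toList with _ | ⟨c0, rest⟩
  · exact hs1 hs
  · have hc0 : c0 = ' ' := hall c0 (by rw [hs]; simp)
    rw [hs, hdrop] at htl
    rw [show b + 1 - a = (b - a) + 1 from by omega] at htl
    rw [List.take_succ_cons] at htl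
    have : t[a] = c0 := (List.cons.injEq _ _ _ _ ▸ htl).1
    rw [hc0] at this
    exact hans this
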